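-- pv_equiv track=rewrite | github.com/yuemhu/T6CNN | extract N-ter Aa/Integbpb_Pos100AanFrequency.py | extractPosFeature
-- ===== SOURCE A (Python) =====
-- def extractPosFeature(input_dict,PosAaFrequency_dict,length):
-- 	PosFeature = {}
-- 	for key,valueL in input_dict.items():
-- 		seqLen = len(valueL)
-- 		PosValue = []
-- 		for i in  range(length):
-- 			if i <seqLen:
-- 				j=valueL[i]+str(i+1)
-- 				if j in PosAaFrequency_dict.keys():
-- 					PosValue.append(PosAaFrequency_dict[j])
-- 				else:
-- 					PosValue.append('0')
-- 			else:
-- 				PosValue.append('0')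
-- 		PosFeature[key]=PosValue
-- 	return PosFeature
-- ===== SOURCE B (Python) =====
-- def extractPosFeature(input_dict, PosAaFrequency_dict, length):
--     keys = list(input_dict)
--     seqs = list(input_dict.values())
--     n = max(length, 0)
--     # column-major: build one column per position across all sequences,
--     # hoisting the positional suffix str(i+1) out of the per-sequence work
--     cols = []
--     for i in range(n):
--         suf = str(i + 1)
--         cols.append([PosAaFrequency_dict.get(s[i] + suf, '0') if i < len(s) else '0'
--                      for s in seqs])
--     # transpose the column matrix back into one feature row per sequence
--     rows = [[col[r] for col in cols] for r in range(len(seqs))]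
--     return dict(zip(keys, rows))
-- ===== Notes on version B (the rewrite author's own statement) =====
-- stated objective: alternative
-- what changed: B traverses position-major instead of key-major: it builds a column matrix (one list per position across all sequences, with the positional suffix str(i+1) computed once per position), then transposes it by index into the per-key rows and zips them with the keys, instead of A's per-key inner loop over range(length).
import Mathlib
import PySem

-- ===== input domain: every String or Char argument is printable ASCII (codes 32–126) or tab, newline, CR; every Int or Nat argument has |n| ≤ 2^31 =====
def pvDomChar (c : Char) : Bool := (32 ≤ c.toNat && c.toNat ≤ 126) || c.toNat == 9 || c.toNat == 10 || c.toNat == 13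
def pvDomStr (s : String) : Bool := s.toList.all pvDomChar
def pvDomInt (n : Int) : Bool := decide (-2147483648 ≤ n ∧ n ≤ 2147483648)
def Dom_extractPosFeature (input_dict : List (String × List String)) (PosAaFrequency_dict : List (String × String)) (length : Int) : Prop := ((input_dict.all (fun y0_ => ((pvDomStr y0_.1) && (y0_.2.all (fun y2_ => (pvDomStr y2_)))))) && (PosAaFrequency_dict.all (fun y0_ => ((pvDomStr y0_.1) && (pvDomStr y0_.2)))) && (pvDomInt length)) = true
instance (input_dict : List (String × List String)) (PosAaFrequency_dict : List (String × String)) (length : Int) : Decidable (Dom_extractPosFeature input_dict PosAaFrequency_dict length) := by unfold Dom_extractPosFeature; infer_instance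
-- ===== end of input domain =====

-- B traverses position-major: it builds a column matrix (one list per position, across all
-- sequences), transposes it by index into per-key rows and zips them with the keys, instead of
-- A's per-key index loop; return values are proved equal (objective: alternative).

-- ===== PORT A =====
def extractPosFeature (input_dict : List (String × List String)) (PosAaFrequency_dict : List (String × String)) (length : Int) : List (String × List String) :=
  let freq := PySem.Dict.ofList PosAaFrequency_dict
  let PosFeature :=
    input_dict.foldl (fun PosFeature kv =>
      let valueL := kv.2
      let seqLen : Int := valueL.length
      let PosValue :=
        (PySem.List.pyRange 0 length 1).foldl (fun PosValue i =>
          if i < seqLen then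
            let j := PySem.List.pyGetD valueL i "" ++ PySem.Int.toStr (i + 1)
            match freq.get? j with
            | some v => PosValue ++ [v]
            | none => PosValue ++ ["0"]
          else
            PosValue ++ ["0"]) []
      PosFeature.insert kv.1 PosValue) (PySem.Dict.empty : PySem.Dict String (List String))
  PosFeature.items

-- ===== PORT B =====
def extractPosFeature_alt (input_dict : List (String × List String)) (PosAaFrequency_dict : List (String × String)) (length : Int) : List (String × List String) :=
  let freq := PySem.Dict.ofList PosAaFrequency_dict
  let keys := input_dict.map (·.1)
  let seqs := input_dict.map (·.2)
  let n : Int := max length 0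
  let cols :=
    (PySem.List.pyRange 0 n 1).foldl (fun cols i =>
      let suf := PySem.Int.toStr (i + 1)
      cols ++ [seqs.map (fun s =>
        if i < (s.length : Int) then freq.getD (PySem.List.pyGetD s i "" ++ suf) "0" else "0")]) []
  let rows := (List.range seqs.length).map (fun (r : Nat) => cols.map (fun col => PySem.List.pyGetD col (r : Int) ""))
  ((keys.zip rows).foldl (fun d p => d.insert p.1 p.2)
    (PySem.Dict.empty : PySem.Dict String (List String))).items

-- ===== PRECONDITION & SPEC =====
def Spec_extractPosFeature (input_dict : List (String × List String)) (PosAaFrequency_dict : List (String × String)) (length : Int) (out : List (String × List String)) : Prop := out = extractPosFeature_alt input_dict PosAaFrequency_dict length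
instance (input_dict : List (String × List String)) (PosAaFrequency_dict : List (String × String)) (length : Int) (out : List (String × List String)) : Decidable (Spec_extractPosFeature input_dict PosAaFrequency_dict length out) := by unfold Spec_extractPosFeature; infer_instance

-- ===== CLAIM (what is proved, stated in full; the proofs are below) =====
def Claim_equal_extractPosFeature : Prop := ∀ (input_dict : List (String × List String)) (PosAaFrequency_dict : List (String × String)) (length : Int), Dom_extractPosFeature input_dict PosAaFrequency_dict length → Spec_extractPosFeature input_dict PosAaFrequency_dict length (extractPosFeature input_dict PosAaFrequency_dict length)

-- ===== LEMMAS AND PROOFS =====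

-- a foldl that only appends singletons is a map
theorem pvFoldlAppendMap {α β : Type} (g : α → β) (l : List α) (init : List β) :
    l.foldl (fun acc x => acc ++ [g x]) init = init ++ l.map g := by
  induction l generalizing init with
  | nil => simp
  | cons x xs ih => simp [List.foldl, ih]

-- the per-position entry both programs compute
def pvG (freq : PySem.Dict String String) (s : List String) (i : Int) : String :=
  if i < (s.length : Int) then freq.getD (PySem.List.pyGetD s i "" ++ PySem.Int.toStr (i + 1)) "0" else "0"

-- A's inner loop is the map of pvG over range(max length 0)
theorem pvInnerA (freq : PySem.Dict String String) (v : List String) (L : Int) :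
    (PySem.List.pyRange 0 L 1).foldl (fun PosValue i =>
        if i < (v.length : Int) then
          match freq.get? (PySem.List.pyGetD v i "" ++ PySem.Int.toStr (i + 1)) with
          | some w => PosValue ++ [w]
          | none => PosValue ++ ["0"]
        else PosValue ++ ["0"]) []
      = (PySem.List.pyRange 0 (max L 0) 1).map (pvG freq v) := by
  have hbody : (fun (PosValue : List String) (i : Int) =>
      if i < (v.length : Int) then
        match freq.get? (PySem.List.pyGetD v i "" ++ PySem.Int.toStr (i + 1)) with
        | some w => PosValue ++ [w]
        | none => PosValue ++ ["0"]
      else PosValue ++ ["0"])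
      = (fun PosValue i => PosValue ++ [pvG freq v i]) := by
    funext acc i
    by_cases h : i < (v.length : Int)
    · simp only [pvG, h, if_true, PySem.Dict.getD]
      cases freq.get? (PySem.List.pyGetD v i "" ++ PySem.Int.toStr (i + 1)) <;> simp
    · simp [pvG, h]
  have hr : PySem.List.pyRange 0 L 1 = PySem.List.pyRange 0 (max L 0) 1 := by
    by_cases h : L ≤ 0
    · rw [PySem.List.pyRange_one_eq_nil h, max_eq_right h, PySem.List.pyRange_one_eq_nil le_rfl]
    · rw [max_eq_left (le_of_not_ge h)]
  rw [hbody, hr, pvFoldlAppendMap, List.nil_append]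

-- pointwise-equal steps give equal folds
theorem pvFoldlCongrFun {A B : Type} (f g : B → A → B) (h : ∀ acc x, f acc x = g acc x) :
    ∀ (l : List A) (init : B), l.foldl f init = l.foldl g init := by
  intro l
  induction l with
  | nil => intro init; rfl
  | cons x xs ih => intro init; simp only [List.foldl]; rw [h]; exact ih _

-- ===== VERDICT (by name: the statement is the Claim_ definition above) =====
theorem extractPosFeature_spec : Claim_equal_extractPosFeature := by
  intro input_dict PosAaFrequency_dict length _
  unfold Spec_extractPosFeature extractPosFeature extractPosFeature_alt
  dsimp only
  set freq := PySem.Dict.ofList PosAaFrequency_dict with hfreq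
  set n : Int := max length 0 with hn
  -- B's column matrix, as a map
  have hcols : (PySem.List.pyRange 0 n 1).foldl (fun cols i =>
        cols ++ [(input_dict.map (·.2)).map (fun s =>
          if i < (s.length : Int) then freq.getD (PySem.List.pyGetD s i "" ++ PySem.Int.toStr (i + 1)) "0" else "0")]) []
      = (PySem.List.pyRange 0 n 1).map (fun i => (input_dict.map (·.2)).map (fun s => pvG freq s i)) := by
    rw [pvFoldlAppendMap, List.nil_append]
    rfl
  rw [hcols]
  -- B's rows are the per-sequence maps
  have hrows : (List.range (input_dict.map (·.2)).length).map (fun (r : Nat) =>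
        ((PySem.List.pyRange 0 n 1).map (fun i => (input_dict.map (·.2)).map (fun s => pvG freq s i))).map
          (fun col => PySem.List.pyGetD col (r : Int) ""))
      = (input_dict.map (·.2)).map (fun s => (PySem.List.pyRange 0 n 1).map (pvG freq s)) := by
    apply List.ext_getElem
    · simp
    · intro r h1 h2
      simp only [List.getElem_map, List.getElem_range, List.map_map]
      apply List.map_congr_left
      intro i _
      have hr : r < (input_dict.map (·.2)).length := by simpa using h1
      simp only [Function.comp]
      rw [PySem.List.pyGetD_natCast, List.getD_eq_getElem?_getD,
        List.getElem?_eq_getElem (by simpa using hr :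
          r < (input_dict.map ((fun s => pvG freq s i) ∘ (fun x => x.2))).length)]
      simp
  rw [hrows]
  -- zip of the two maps is a map of pairs
  rw [List.map_map, List.zip_map', List.foldl_map]
  -- A's fold performs exactly these insertions, entry by entry
  congr 1
  apply pvFoldlCongrFun
  intro d kv
  rw [pvInnerA, ← hn]; rfl
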